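-- pv_equiv track=rewrite | github.com/AgileRE-2023/stakeholder-requirement-retriever | getByQuery/mainprocess.py | get_three_words_terms
-- ===== SOURCE A (Python) =====
-- def get_three_words_terms(top_one_word_nouns,job_listings_per_word_after_pos_tagging):
--     def extract_adjacent_terms(tokenized_sentences, term):
--         new_terms = []
--         for sentence in tokenized_sentences:
--             for i, word in enumerate(sentence):
--                 if word.lower() == term.lower():
--                     # Extract the three words before and after the term
--                     before_words = sentence[max(0, i - 2):i]
--                     after_words = sentence[i + 1:min(i + 3, len(sentence))]
--
--                     # Add the context words to the list
--                     if before_words: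
--                         new_terms.append(' '.join(before_words + [term]))
--                     if after_words:
--                         new_terms.append(' '.join([term] + after_words))
--
--         return new_terms
--
--     all_new_3_words_terms = []
--
--     # Loop over each term in terms_list
--     for term in top_one_word_nouns:
--         new_terms = extract_adjacent_terms(job_listings_per_word_after_pos_tagging, term)
--         all_new_3_words_terms.extend(new_terms)
--
--     # Remove duplicates
--     all_new_3_words_terms = list(set(all_new_3_words_terms))
--
--     return all_new_3_words_terms
-- ===== SOURCE B (Python) =====
-- def get_three_words_terms(top_one_word_nouns, job_listings_per_word_after_pos_tagging):
--     # One pass over the sentences builds an index: lowercased word -> list of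
--     # (before-context, after-context) pairs for each occurrence, in traversal order.
--     index = {}
--     for sentence in job_listings_per_word_after_pos_tagging:
--         for i, word in enumerate(sentence):
--             index.setdefault(word.lower(), []).append(
--                 (sentence[max(0, i - 2):i], sentence[i + 1:i + 3]))
--     out = []
--     for term in top_one_word_nouns:
--         for before, after in index.get(term.lower(), []):
--             if before:
--                 out.append(' '.join(before + [term]))
--             if after:
--                 out.append(' '.join([term] + after))
--     return list(set(out))
-- ===== Notes on version B (the rewrite author's own statement) =====
-- stated objective: alternative
-- what changed: Instead of rescanning every sentence once per noun, B makes a single pass over the sentences building a dict from each lowercased word to the list of its occurrence contexts, then answers each noun by one dict lookup; the final list(set(...)) dedup is unchanged (intended as faster; measured 2.6x at the largest size both finished, unconfirmed at the top size where both hit the output-size wall).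
import Mathlib
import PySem

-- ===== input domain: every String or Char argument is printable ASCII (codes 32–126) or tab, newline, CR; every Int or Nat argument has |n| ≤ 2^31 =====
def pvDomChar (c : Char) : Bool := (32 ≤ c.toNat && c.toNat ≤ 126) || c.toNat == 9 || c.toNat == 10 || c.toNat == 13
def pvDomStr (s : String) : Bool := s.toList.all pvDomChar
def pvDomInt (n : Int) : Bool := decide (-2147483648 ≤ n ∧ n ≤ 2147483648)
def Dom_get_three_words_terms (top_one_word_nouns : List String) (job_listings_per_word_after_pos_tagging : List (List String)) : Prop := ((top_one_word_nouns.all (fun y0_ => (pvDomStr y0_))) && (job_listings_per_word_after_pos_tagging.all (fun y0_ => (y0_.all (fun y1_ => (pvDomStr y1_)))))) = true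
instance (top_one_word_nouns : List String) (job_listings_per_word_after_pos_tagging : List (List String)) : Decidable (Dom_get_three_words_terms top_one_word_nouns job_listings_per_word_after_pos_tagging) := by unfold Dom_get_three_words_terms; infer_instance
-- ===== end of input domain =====

-- B replaces A's per-noun rescan of all sentences by a single indexing pass
-- (lowercased word -> list of occurrence contexts) followed by one lookup per noun.
-- Python's final list(set(...)) is ported as PySem.Set.ofList (result compared as a set).

-- ===== PORT A =====
def get_three_words_terms (top_one_word_nouns : List String) (job_listings_per_word_after_pos_tagging : List (List String)) : List String :=
  let extract_adjacent_terms := fun (tokenized_sentences : List (List String)) (term : String) =>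
    tokenized_sentences.foldl (fun new_terms sentence =>
      (PySem.List.enumerate sentence 0).foldl (fun new_terms p =>
        if PySem.Str.lower p.2 == PySem.Str.lower term then
          let before_words := PySem.List.slice sentence (some (max 0 (p.1 - 2))) (some p.1)
          let after_words := PySem.List.slice sentence (some (p.1 + 1)) (some (min (p.1 + 3) (PySem.List.len sentence)))
          let new_terms := if before_words ≠ [] then new_terms ++ [PySem.Str.join " " (before_words ++ [term])] else new_terms
          if after_words ≠ [] then new_terms ++ [PySem.Str.join " " ([term] ++ after_words)] else new_terms
        else new_terms) new_terms) []
  PySem.Set.ofList (top_one_word_nouns.foldl (fun all_new term =>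
    all_new ++ extract_adjacent_terms job_listings_per_word_after_pos_tagging term) [])

-- ===== PORT B =====
def get_three_words_terms_alt (top_one_word_nouns : List String) (job_listings_per_word_after_pos_tagging : List (List String)) : List String :=
  let index : PySem.Dict String (List (List String × List String)) :=
    job_listings_per_word_after_pos_tagging.foldl (fun d sentence =>
      (PySem.List.enumerate sentence 0).foldl (fun d p =>
        d.modify (PySem.Str.lower p.2) []
          (· ++ [(PySem.List.slice sentence (some (max 0 (p.1 - 2))) (some p.1),
                  PySem.List.slice sentence (some (p.1 + 1)) (some (p.1 + 3)))])) d)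
      PySem.Dict.empty
  let out := top_one_word_nouns.foldl (fun out term =>
    (index.getD (PySem.Str.lower term) []).foldl (fun out ba =>
      let out := if ba.1 ≠ [] then out ++ [PySem.Str.join " " (ba.1 ++ [term])] else out
      if ba.2 ≠ [] then out ++ [PySem.Str.join " " ([term] ++ ba.2)] else out) out) []
  PySem.Set.ofList out

-- ===== PRECONDITION & SPEC =====
def Spec_get_three_words_terms (top_one_word_nouns : List String) (job_listings_per_word_after_pos_tagging : List (List String)) (out : List String) : Prop := out = get_three_words_terms_alt top_one_word_nouns job_listings_per_word_after_pos_tagging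
instance (top_one_word_nouns : List String) (job_listings_per_word_after_pos_tagging : List (List String)) (out : List String) : Decidable (Spec_get_three_words_terms top_one_word_nouns job_listings_per_word_after_pos_tagging out) := by unfold Spec_get_three_words_terms; infer_instance

-- ===== CLAIM (what is proved, stated in full; the proofs are below) =====
def Claim_equal_get_three_words_terms : Prop := ∀ (top_one_word_nouns : List String) (job_listings_per_word_after_pos_tagging : List (List String)), Dom_get_three_words_terms top_one_word_nouns job_listings_per_word_after_pos_tagging → Spec_get_three_words_terms top_one_word_nouns job_listings_per_word_after_pos_tagging (get_three_words_terms top_one_word_nouns job_listings_per_word_after_pos_tagging)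

-- ===== LEMMAS AND PROOFS =====

/-- The (before, after) context pair of the occurrence at index `i` of `s`, as B stores it. -/
def pvCtx (s : List String) (i : Int) : List String × List String :=
  (PySem.List.slice s (some (max 0 (i - 2))) (some i),
   PySem.List.slice s (some (i + 1)) (some (i + 3)))

/-- The (0, 1 or 2) strings emitted for one occurrence context. -/
def pvEmit (term : String) (ba : List String × List String) : List String :=
  (if ba.1 ≠ [] then [PySem.Str.join " " (ba.1 ++ [term])] else []) ++
  (if ba.2 ≠ [] then [PySem.Str.join " " ([term] ++ ba.2)] else [])

/-- All (lowercased word, context) pairs, in traversal order. -/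
def pvPairs (sents : List (List String)) : List (String × (List String × List String)) :=
  sents.flatMap (fun s => (PySem.List.enumerate s 0).map (fun p => (PySem.Str.lower p.2, pvCtx s p.1)))

/-- What both programs produce (before dedup) for one term. -/
def pvTerm (sents : List (List String)) (term : String) : List String :=
  sents.flatMap (fun s => (PySem.List.enumerate s 0).flatMap (fun p =>
    if PySem.Str.lower p.2 == PySem.Str.lower term then pvEmit term (pvCtx s p.1) else []))

/-- A's after-slice stop `min (i+3) len` clamps exactly as B's `i+3` does. -/
theorem pv_slice_min (s : List String) (k : Nat) :
    PySem.List.slice s (some ((k : Int) + 1)) (some (min ((k : Int) + 3) (PySem.List.len s))) =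
    PySem.List.slice s (some ((k : Int) + 1)) (some ((k : Int) + 3)) := by
  have h1 : (0:Int) ≤ (k:Int) + 1 := by positivity
  have hlen : PySem.List.len s = (s.length : Int) := PySem.List.len_eq s
  rw [PySem.List.slice_toNat s h1 (b := min ((k:Int) + 3) (PySem.List.len s)) (by rw [hlen]; omega),
      PySem.List.slice_toNat s h1 (b := (k:Int) + 3) (by omega)]
  apply List.take_eq_take_iff.mpr
  rw [hlen]; simp; omega

/-- The two sequential conditional appends are `acc ++ pvEmit term ba`. -/
theorem pv_step (term : String) (acc : List String) (ba : List String × List String) :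
    (let acc' := if ba.1 ≠ [] then acc ++ [PySem.Str.join " " (ba.1 ++ [term])] else acc
     if ba.2 ≠ [] then acc' ++ [PySem.Str.join " " ([term] ++ ba.2)] else acc') =
    acc ++ pvEmit term ba := by
  by_cases h1 : ba.1 = [] <;> by_cases h2 : ba.2 = [] <;> simp [pvEmit, h1, h2]

theorem pv_flatMap_filter_map {α β γ : Type} (l : List α) (p : α → Bool) (f : α → β) (g : β → List γ) :
    ((l.filter p).map f).flatMap g = l.flatMap (fun x => if p x then g (f x) else []) := by
  induction l with
  | nil => simp
  | cons x xs ih => by_cases h : p x <;> simp [h, ih]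

/-- A's per-term extraction loop, in flatMap form. -/
theorem pv_extractA (sents : List (List String)) (term : String) :
    sents.foldl (fun new_terms sentence =>
      (PySem.List.enumerate sentence 0).foldl (fun new_terms p =>
        if PySem.Str.lower p.2 == PySem.Str.lower term then
          let before_words := PySem.List.slice sentence (some (max 0 (p.1 - 2))) (some p.1)
          let after_words := PySem.List.slice sentence (some (p.1 + 1)) (some (min (p.1 + 3) (PySem.List.len sentence)))
          let new_terms := if before_words ≠ [] then new_terms ++ [PySem.Str.join " " (before_words ++ [term])] else new_terms
          if after_words ≠ [] then new_terms ++ [PySem.Str.join " " ([term] ++ after_words)] else new_terms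
        else new_terms) new_terms) [] =
    pvTerm sents term := by
  have inner : ∀ (s : List String) (acc : List String),
      (PySem.List.enumerate s 0).foldl (fun new_terms p =>
        if PySem.Str.lower p.2 == PySem.Str.lower term then
          let before_words := PySem.List.slice s (some (max 0 (p.1 - 2))) (some p.1)
          let after_words := PySem.List.slice s (some (p.1 + 1)) (some (min (p.1 + 3) (PySem.List.len s)))
          let new_terms := if before_words ≠ [] then new_terms ++ [PySem.Str.join " " (before_words ++ [term])] else new_terms
          if after_words ≠ [] then new_terms ++ [PySem.Str.join " " ([term] ++ after_words)] else new_terms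
        else new_terms) acc =
      acc ++ (PySem.List.enumerate s 0).flatMap (fun p =>
        if PySem.Str.lower p.2 == PySem.Str.lower term then pvEmit term (pvCtx s p.1) else []) := by
    intro s acc
    rw [PySem.List.foldl_congr_mem
      (g := fun acc p => acc ++ (if PySem.Str.lower p.2 == PySem.Str.lower term then pvEmit term (pvCtx s p.1) else []))]
    · exact PySem.List.foldl_append_eq_flatMap _ _ _
    · intro acc p hp
      by_cases hm : PySem.Str.lower p.2 == PySem.Str.lower term
      · simp only [hm, if_pos]
        obtain ⟨k, hk, rfl⟩ := (PySem.List.mem_enumerate_iff _ _ _).mp hp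
        simp only [zero_add]
        rw [pv_slice_min s k]
        exact pv_step term acc (pvCtx s (k : Int))
      · simp [hm]
  rw [PySem.List.foldl_congr_mem
    (g := fun acc s => acc ++ (PySem.List.enumerate s 0).flatMap (fun p =>
      if PySem.Str.lower p.2 == PySem.Str.lower term then pvEmit term (pvCtx s p.1) else []))]
  · exact PySem.List.foldl_append_eq_flatMap _ _ _
  · intro acc s _; exact inner s acc

/-- B's nested index-building loop is a flat fold over pvPairs. -/
theorem pv_nested (sents : List (List String)) (d : PySem.Dict String (List (List String × List String))) :
    sents.foldl (fun d sentence =>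
      (PySem.List.enumerate sentence 0).foldl (fun d p =>
        d.modify (PySem.Str.lower p.2) []
          (· ++ [(PySem.List.slice sentence (some (max 0 (p.1 - 2))) (some p.1),
                  PySem.List.slice sentence (some (p.1 + 1)) (some (p.1 + 3)))])) d) d =
    (pvPairs sents).foldl (fun d q => d.modify q.1 [] (· ++ [q.2])) d := by
  induction sents generalizing d with
  | nil => simp [pvPairs]
  | cons s rest ih =>
    simp only [pvPairs, List.flatMap_cons, List.foldl_append, List.foldl_map, List.foldl_cons]
    rw [ih]
    rfl

/-- B's index lookup, characterised. -/
theorem pv_indexB (sents : List (List String)) (c : String) :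
    (sents.foldl (fun d sentence =>
      (PySem.List.enumerate sentence 0).foldl (fun d p =>
        d.modify (PySem.Str.lower p.2) []
          (· ++ [(PySem.List.slice sentence (some (max 0 (p.1 - 2))) (some p.1),
                  PySem.List.slice sentence (some (p.1 + 1)) (some (p.1 + 3)))])) d)
      PySem.Dict.empty).getD c [] =
    ((pvPairs sents).filter (fun q => q.1 == c)).map (·.2) := by
  rw [pv_nested, PySem.Dict.getD_foldl_modify_append]
  rfl

/-- Emitting over the looked-up context list gives pvTerm. -/
theorem pv_termB (sents : List (List String)) (term : String) :
    (((pvPairs sents).filter (fun q => q.1 == PySem.Str.lower term)).map (·.2)).flatMap (pvEmit term) =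
    pvTerm sents term := by
  rw [pv_flatMap_filter_map]
  unfold pvPairs pvTerm
  induction sents with
  | nil => simp
  | cons s rest ih => simp only [List.flatMap_cons, List.flatMap_append, List.flatMap_map, ih]

/-- The inner emission fold over any context list. -/
theorem pv_foldl_emit (term : String) (lst : List (List String × List String)) (acc : List String) :
    lst.foldl (fun out ba =>
      let out := if ba.1 ≠ [] then out ++ [PySem.Str.join " " (ba.1 ++ [term])] else out
      if ba.2 ≠ [] then out ++ [PySem.Str.join " " ([term] ++ ba.2)] else out) acc =
    acc ++ lst.flatMap (pvEmit term) := by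
  induction lst generalizing acc with
  | nil => simp
  | cons ba rest ih =>
    simp only [List.foldl_cons, List.flatMap_cons]
    rw [pv_step, ih, List.append_assoc]

/-- B's whole output loop, in flatMap form. -/
theorem pv_outB (sents : List (List String)) (nouns : List String) (acc : List String) :
    nouns.foldl (fun out term =>
      ((sents.foldl (fun d sentence =>
          (PySem.List.enumerate sentence 0).foldl (fun d p =>
            d.modify (PySem.Str.lower p.2) []
              (· ++ [(PySem.List.slice sentence (some (max 0 (p.1 - 2))) (some p.1),
                      PySem.List.slice sentence (some (p.1 + 1)) (some (p.1 + 3)))])) d)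
          PySem.Dict.empty).getD (PySem.Str.lower term) []).foldl (fun out ba =>
        let out := if ba.1 ≠ [] then out ++ [PySem.Str.join " " (ba.1 ++ [term])] else out
        if ba.2 ≠ [] then out ++ [PySem.Str.join " " ([term] ++ ba.2)] else out) out) acc =
    acc ++ nouns.flatMap (fun term => pvTerm sents term) := by
  induction nouns generalizing acc with
  | nil => simp
  | cons term rest ih =>
    simp only [List.foldl_cons, List.flatMap_cons]
    rw [pv_indexB sents (PySem.Str.lower term), pv_foldl_emit, pv_termB, ih, List.append_assoc]

-- ===== VERDICT (by name: the statement is the Claim_ definition above) =====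
theorem get_three_words_terms_spec : Claim_equal_get_three_words_terms := by
  intro nouns sents _
  unfold Spec_get_three_words_terms
  show get_three_words_terms nouns sents = get_three_words_terms_alt nouns sents
  simp only [get_three_words_terms, get_three_words_terms_alt]
  congr 1
  -- A side becomes a flatMap of the per-term extraction
  rw [PySem.List.foldl_append_eq_flatMap]
  -- B side becomes the same flatMap
  rw [pv_outB]
  simp only [List.nil_append]
  have hA : (fun term => sents.foldl (fun new_terms sentence =>
      (PySem.List.enumerate sentence 0).foldl (fun new_terms p =>
        if PySem.Str.lower p.2 == PySem.Str.lower term then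
          let before_words := PySem.List.slice sentence (some (max 0 (p.1 - 2))) (some p.1)
          let after_words := PySem.List.slice sentence (some (p.1 + 1)) (some (min (p.1 + 3) (PySem.List.len sentence)))
          let new_terms := if before_words ≠ [] then new_terms ++ [PySem.Str.join " " (before_words ++ [term])] else new_terms
          if after_words ≠ [] then new_terms ++ [PySem.Str.join " " ([term] ++ after_words)] else new_terms
        else new_terms) new_terms) []) =
      (fun term => pvTerm sents term) := funext (fun term => pv_extractA sents term)
  rw [hA]
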